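-- pv_equiv track=rewrite | github.com/IlyaSk10/azimuth | main_segy_v.2.py | get_txt_header
-- ===== SOURCE A (Python) =====
-- def get_txt_header(well):
--     t = [None] * 40
--     t[ 0] = f"C 1"
--     t[ 1] = f"C 2 Area: Piltun-Astokhskoye"
--     t[ 2] = f"C 3 Well: {well}"
--     t[ 3] = f"C 4"
--     t[ 4] = f"C 5"
--     t[ 5] = f"C 6"
--     t[ 6] = f"C 7"
--     t[ 7] = f"C 8 CRS: WGS 84 / UTM zone 54N"
--     t[ 8] = f"C 9"
--     t[ 9] = f"C10"
--     t[10] = f"C11 TVD Reference Elevation: 63.700 m above MSL"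
--     t[11] = f"C12 Seabed / Ground Elevation: 31.280 m below MSL"
--     t[12] = f"C13"
--     t[13] = f"C14 Coordinate scale factor: 100.0"
--     t[14] = f"C15 Elevations & depths scale factor: 100.0"
--     t[15] = f"C16 sampling rate=3000 Hz"
--     t[16] = f"C17 6 traces (6 power components) ['xx', 'yy', 'zz', 'xy', 'xz', 'yz']"
--     t[17] = f"C18"
--     t[18] = f"C19"
--     t[19] = f"C20"
--     t[20] = f"C21"
--     t[21] = f"C22"
--     t[22] = f"C23"
--     t[23] = f"C24"
--     t[24] = f"C25"
--     t[25] = f"C26"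
--     t[26] = f"C27"
--     t[27] = f"C28"
--     t[28] = f"C29"
--     t[29] = f"C30"
--     t[30] = f"C31"
--     t[31] = f"C32"
--     t[32] = f"C33"
--     t[33] = f"C34"
--     t[34] = f"C35"
--     t[35] = f"C36"
--     t[36] = f"C37"
--     t[37] = f"C38"
--     t[38] = f"C39"
--     t[39] = f"C40"
--     for i in range(len(t)):
--         t[i] = t[i].ljust(80, ' ')
--     return ''.join(t)
-- ===== SOURCE B (Python) =====
-- def get_txt_header(well):
--     overrides = {
--         1: ' Area: Piltun-Astokhskoye',
--         2: f' Well: {well}',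
--         7: ' CRS: WGS 84 / UTM zone 54N',
--         10: ' TVD Reference Elevation: 63.700 m above MSL',
--         11: ' Seabed / Ground Elevation: 31.280 m below MSL',
--         13: ' Coordinate scale factor: 100.0',
--         14: ' Elevations & depths scale factor: 100.0',
--         15: ' sampling rate=3000 Hz',
--         16: " 6 traces (6 power components) ['xx', 'yy', 'zz', 'xy', 'xz', 'yz']",
--     }
--     return ''.join(f"C{i + 1:2d}{overrides.get(i, '')}".ljust(80) for i in range(40))
-- ===== Notes on version B (the rewrite author's own statement) =====
-- stated objective: simpler
-- what changed: Replaces A's 40 hardcoded line assignments with a single loop that computes each two-width line-number prefix from the loop index and looks up the few non-empty suffixes in a sparse overrides dict.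
import Mathlib
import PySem

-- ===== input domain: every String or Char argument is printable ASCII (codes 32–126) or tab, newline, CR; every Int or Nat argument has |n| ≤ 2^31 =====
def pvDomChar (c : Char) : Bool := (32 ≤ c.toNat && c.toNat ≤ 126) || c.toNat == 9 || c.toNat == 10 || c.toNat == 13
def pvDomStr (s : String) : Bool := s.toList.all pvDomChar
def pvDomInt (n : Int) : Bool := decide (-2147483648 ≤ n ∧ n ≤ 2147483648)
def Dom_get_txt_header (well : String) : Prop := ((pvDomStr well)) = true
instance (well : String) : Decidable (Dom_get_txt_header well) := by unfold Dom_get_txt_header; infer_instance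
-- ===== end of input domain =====

-- B replaces A's 40 hardcoded line literals by a computed 'C{i+1:2d}' prefix plus a
-- sparse overrides table for the few lines carrying extra text (objective: simpler).

-- shared helper: s.ljust(w, ' ') on code points — exact (pads on the right with spaces
-- up to width w, returns s unchanged if already at least w long), used by both Pythons
def pyLjust (s : List Char) (w : Nat) : List Char := s ++ List.replicate (w - s.length) ' '

-- ===== PORT A =====
-- the 40 assignments t[0] … t[39], as code-point lists (f-strings concatenating 'well')
def pvLinesA (well : String) : List (List Char) :=
  [ "C 1".toList
  , "C 2 Area: Piltun-Astokhskoye".toList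
  , "C 3 Well: ".toList ++ well.toList
  , "C 4".toList
  , "C 5".toList
  , "C 6".toList
  , "C 7".toList
  , "C 8 CRS: WGS 84 / UTM zone 54N".toList
  , "C 9".toList
  , "C10".toList
  , "C11 TVD Reference Elevation: 63.700 m above MSL".toList
  , "C12 Seabed / Ground Elevation: 31.280 m below MSL".toList
  , "C13".toList
  , "C14 Coordinate scale factor: 100.0".toList
  , "C15 Elevations & depths scale factor: 100.0".toList
  , "C16 sampling rate=3000 Hz".toList
  , "C17 6 traces (6 power components) ['xx', 'yy', 'zz', 'xy', 'xz', 'yz']".toList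
  , "C18".toList
  , "C19".toList
  , "C20".toList
  , "C21".toList
  , "C22".toList
  , "C23".toList
  , "C24".toList
  , "C25".toList
  , "C26".toList
  , "C27".toList
  , "C28".toList
  , "C29".toList
  , "C30".toList
  , "C31".toList
  , "C32".toList
  , "C33".toList
  , "C34".toList
  , "C35".toList
  , "C36".toList
  , "C37".toList
  , "C38".toList
  , "C39".toList
  , "C40".toList ]

-- 'for i in range(len(t)): t[i] = t[i].ljust(80, " ")' then ''.join(t)
def get_txt_header (well : String) : String :=
  String.mk (((pvLinesA well).map (fun l => pyLjust l 80)).flatten)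

-- ===== PORT B =====
-- f"{n:2d}" for the n that occur here (1 ≤ n ≤ 40): width-2 right-aligned decimal — exact
def pvFmt2 (n : Int) : List Char :=
  if n < 10 then ' ' :: (PySem.Int.toStr n).toList else (PySem.Int.toStr n).toList

-- the 'overrides' dict (values as code-point lists)
def pvOverrides (well : String) : PySem.Dict Int (List Char) :=
  PySem.Dict.mk  -- literal dict, distinct keys
  [ (1, " Area: Piltun-Astokhskoye".toList)
  , (2, " Well: ".toList ++ well.toList)
  , (7, " CRS: WGS 84 / UTM zone 54N".toList)
  , (10, " TVD Reference Elevation: 63.700 m above MSL".toList)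
  , (11, " Seabed / Ground Elevation: 31.280 m below MSL".toList)
  , (13, " Coordinate scale factor: 100.0".toList)
  , (14, " Elevations & depths scale factor: 100.0".toList)
  , (15, " sampling rate=3000 Hz".toList)
  , (16, " 6 traces (6 power components) ['xx', 'yy', 'zz', 'xy', 'xz', 'yz']".toList) ]

-- ''.join(f"C{i+1:2d}{overrides.get(i, '')}".ljust(80) for i in range(40))
def pvLinesB (well : String) : List (List Char) :=
  (PySem.List.pyRange 0 40 1).map
    (fun i => 'C' :: pvFmt2 (i + 1) ++ PySem.Dict.getD (pvOverrides well) i [])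

def get_txt_header_alt (well : String) : String :=
  String.mk (((pvLinesB well).map (fun l => pyLjust l 80)).flatten)

-- ===== PRECONDITION & SPEC =====
def Spec_get_txt_header (well : String) (out : String) : Prop := out = get_txt_header_alt well
instance (well : String) (out : String) : Decidable (Spec_get_txt_header well out) := by unfold Spec_get_txt_header; infer_instance

-- ===== CLAIM (what is proved, stated in full; the proofs are below) =====
def Claim_equal_get_txt_header : Prop := ∀ (well : String), Dom_get_txt_header well → Spec_get_txt_header well (get_txt_header well)

-- ===== LEMMAS AND PROOFS =====
-- the two line lists coincide (the only non-literal line is index 2, where the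
-- grouping of appends differs by associativity)
theorem pvLines_eq (well : String) : pvLinesB well = pvLinesA well := by
  simp [pvLinesB, pvLinesA, pvOverrides, pvFmt2, PySem.List.pyRange, List.range_succ,
        PySem.Dict.getD, PySem.Int.toStr, PySem.Int.toChars, PySem.Dict.get?,
        Nat.toDigits, Nat.toDigitsCore, Nat.digitChar]

-- ===== VERDICT (by name: the statement is the Claim_ definition above) =====
theorem get_txt_header_spec : Claim_equal_get_txt_header := by
  intro well _
  unfold Spec_get_txt_header get_txt_header get_txt_header_alt
  rw [pvLines_eq]
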